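-- pv_equiv track=rewrite | github.com/chj3748/TIL | Algorithm/baekjoon/bj_15684.py | add_ladder
-- ===== SOURCE A (Python) =====
-- def check(maps):
--     for col in range(1, len(maps[0]) - 2):
--         start = col
--         for row in range(len(maps)):
--             if maps[row][col] == 1:
--                 col += 1
--             elif maps[row][col - 1] == 1:
--                 col -= 1
--         if col != start:
--             return False
--     return True
--
-- def add_ladder(maps, cnt, limit):
--     if cnt == limit:
--         if check(maps):
--             return True
--     else:
--         for y in range(len(maps)):
--             for x in range(1, len(maps[0]) - 2):
--                 if maps[y][x] != 1 and maps[y][x - 1] != 1 and maps[y][x + 1] != 1: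
--                     maps[y][x] = 1
--                     if add_ladder(maps, cnt + 1, limit):
--                         return True
--                     maps[y][x] = 0
-- ===== SOURCE B (Python) =====
-- def add_ladder(maps, cnt, limit):
--     # Canonical-order backtracking: place the remaining ladders on a flat list of
--     # candidate cells in strictly increasing cell order, so each set of cells is
--     # tried once instead of once per permutation.  (Like the original, it sets
--     # maps[y][x] to 1 while exploring and restores it to 0 afterwards.)
--     need = limit - cnt
--     if need < 0:
--         return None
--     h = len(maps)
--     w = len(maps[0])
--     cells = [(y, x) for y in range(h) for x in range(1, w - 2)]
--
--     def free(y, x):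
--         return maps[y][x] != 1 and maps[y][x - 1] != 1 and maps[y][x + 1] != 1
--
--     def ends_at(c):
--         col = c
--         for row in maps:
--             if row[col] == 1:
--                 col += 1
--             elif row[col - 1] == 1:
--                 col -= 1
--         return col
--
--     def dfs(k, start):
--         if k == 0:
--             return all(ends_at(c) == c for c in range(1, w - 2))
--         for i in range(start, len(cells)):
--             y, x = cells[i]
--             if free(y, x):
--                 maps[y][x] = 1
--                 if dfs(k - 1, i + 1):
--                     return True
--                 maps[y][x] = 0
--         return False
--
--     return True if dfs(need, 0) else None
-- ===== Notes on version B (the rewrite author's own statement) =====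
-- stated objective: alternative
-- what changed: A backtracks by re-scanning every board cell at every recursion depth, exploring each set of added ladders once per permutation; B flattens the candidate cells into one list and places ladders in strictly increasing cell-index order (combinations instead of permutations), checking straightness with one walk helper.
-- outside the precondition, e.g. on add_ladder([], 0, 1): A returns None, B raises IndexError; on add_ladder([[0, 0, 0, 0]], 1, 0): A returns None, B returns None; on add_ladder([[1, 0, 0, 0]], 0, 0): A returns None, B returns None
import Mathlib
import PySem

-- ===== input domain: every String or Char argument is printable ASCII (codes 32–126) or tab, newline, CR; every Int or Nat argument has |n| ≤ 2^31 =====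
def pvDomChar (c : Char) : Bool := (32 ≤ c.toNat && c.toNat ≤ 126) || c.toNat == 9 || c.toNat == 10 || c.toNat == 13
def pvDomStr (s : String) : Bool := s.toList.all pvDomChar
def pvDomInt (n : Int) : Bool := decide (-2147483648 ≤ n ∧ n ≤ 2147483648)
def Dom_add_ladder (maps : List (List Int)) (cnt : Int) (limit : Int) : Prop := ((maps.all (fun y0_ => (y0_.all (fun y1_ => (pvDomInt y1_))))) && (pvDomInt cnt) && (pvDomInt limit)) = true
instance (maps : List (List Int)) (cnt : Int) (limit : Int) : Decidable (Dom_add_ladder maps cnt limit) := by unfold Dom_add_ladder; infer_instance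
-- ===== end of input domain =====

-- B replaces A's permutation-order backtracking by canonical-order backtracking over a flat
-- candidate-cell list (each candidate set is tried once, not once per ordering).  Equivalence is
-- about the RETURN value only: both Pythons mutate `maps` during the search (and restore tried
-- cells to 0), and on success the ladder set left in `maps` may differ between A and B.

-- ===== PORT A =====
-- helper check(maps): the per-column walk, one row
def checkStepA (row : List Int) (col : Int) : Option Int :=
  match PySem.List.pyGet? row col with
  | none => none
  | some v =>
    if v = 1 then some (col + 1)
    else
      match PySem.List.pyGet? row (col - 1) with
      | none => none
      | some u => if u = 1 then some (col - 1) else some col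

-- check's inner `for row in range(len(maps))` loop
def checkWalkA (maps : List (List Int)) (c : Int) : Option Int :=
  maps.foldl (fun acc row => acc.bind (checkStepA row)) (some c)

-- check's outer `for col in range(1, len(maps[0]) - 2)` loop with early `return False`
def checkColsA (maps : List (List Int)) : List Int → Option Bool
  | [] => some true
  | c :: rest =>
    match checkWalkA maps c with
    | none => none
    | some e => if e ≠ c then some false else checkColsA maps rest

def checkA (maps : List (List Int)) : Option Bool :=
  match PySem.List.pyGet? maps 0 with
  | none => none
  | some r0 => checkColsA maps (PySem.List.pyRange 1 ((r0.length : Int) - 2) 1)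

-- maps[y][x] != 1 and maps[y][x-1] != 1 and maps[y][x+1] != 1  (short-circuit)
def condFreeA (maps : List (List Int)) (y x : Int) : Option Bool :=
  match PySem.List.pyGet? maps y with
  | none => none
  | some row =>
    match PySem.List.pyGet? row x with
    | none => none
    | some v =>
      if v = 1 then some false
      else
        match PySem.List.pyGet? row (x - 1) with
        | none => none
        | some u =>
          if u = 1 then some false
          else
            match PySem.List.pyGet? row (x + 1) with
            | none => none
            | some t => some (t ≠ 1)

-- maps[y][x] = 1
def placeA (maps : List (List Int)) (y x : Int) : List (List Int) :=
  PySem.List.pySetD maps y (PySem.List.pySetD (PySem.List.pyGetD maps y []) x 1)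

-- inner `for x in range(1, len(maps[0]) - 2)` loop; rec = the recursive call on the mutated board
def loopXA (rec : List (List Int) → Option Bool) (maps : List (List Int)) (y : Int) :
    List Int → Option Bool
  | [] => none
  | x :: rest =>
    match condFreeA maps y x with
    | none => none
    | some false => loopXA rec maps y rest
    | some true =>
      match rec (placeA maps y x) with
      | some true => some true
      | _ => loopXA rec maps y rest

-- outer `for y in range(len(maps))` loop
def loopYA (rec : List (List Int) → Option Bool) (maps : List (List Int)) (xs : List Int) :
    List Int → Option Bool
  | [] => none
  | y :: rest =>
    match loopXA rec maps y xs with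
    | some true => some true
    | _ => loopYA rec maps xs rest

-- add_ladder itself; fuel = remaining recursion depth (limit - cnt), a totality guard only
def goA : Nat → List (List Int) → Int → Int → Option Bool
  | 0, _, _, _ => none
  | fuel + 1, maps, cnt, limit =>
    if cnt = limit then
      match checkA maps with
      | some true => some true
      | _ => none
    else
      match PySem.List.pyGet? maps 0 with
      | none => none
      | some r0 =>
        loopYA (fun m => goA fuel m (cnt + 1) limit) maps
          (PySem.List.pyRange 1 ((r0.length : Int) - 2) 1)
          (PySem.List.pyRange 0 (maps.length : Int) 1)

def add_ladder (maps : List (List Int)) (cnt : Int) (limit : Int) : Option Bool :=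
  goA ((limit - cnt).toNat + 1) maps cnt limit

-- ===== PORT B =====
-- ends_at's per-row step
def stepB (col : Int) (row : List Int) : Option Int :=
  (PySem.List.pyGet? row col).bind fun v =>
    if v = 1 then some (col + 1)
    else
      (PySem.List.pyGet? row (col - 1)).bind fun u =>
        if u = 1 then some (col - 1) else some col

-- ends_at(c): `for row in maps`
def endsAtB (maps : List (List Int)) (c : Int) : Option Int :=
  maps.foldl (fun acc row => acc.bind fun col => stepB col row) (some c)

-- straight(): all(ends_at(c) == c for c in range(1, w - 2)), stopping at the first False
def straightB (maps : List (List Int)) : List Int → Option Bool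
  | [] => some true
  | c :: rest =>
    (endsAtB maps c).bind fun e =>
      if e = c then straightB maps rest else some false

-- free(y, x)  (short-circuit `and`)
def freeB (maps : List (List Int)) (y x : Int) : Option Bool :=
  (PySem.List.pyGet? maps y).bind fun row =>
    (PySem.List.pyGet? row x).bind fun v =>
      if v = 1 then some false
      else
        (PySem.List.pyGet? row (x - 1)).bind fun u =>
          if u = 1 then some false
          else (PySem.List.pyGet? row (x + 1)).bind fun t => some (t ≠ 1)

-- Source B's `maps[y][x] = 1` is the identical assignment A performs, so port B reuses placeA
-- cells = [(y, x) for y in range(h) for x in range(1, w - 2)]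
def cellsB (h w : Int) : List (Int × Int) :=
  (PySem.List.pyRange 0 h 1).flatMap fun y =>
    (PySem.List.pyRange 1 (w - 2) 1).map fun x => (y, x)

-- `for i in range(start, len(cells))`; rec m s = dfs(k - 1, s) on the mutated board m
def loopB (rec : List (List Int) → Int → Option Bool) (maps : List (List Int))
    (cells : List (Int × Int)) : List Int → Option Bool
  | [] => some false
  | i :: rest =>
    match PySem.List.pyGet? cells i with
    | none => none
    | some (y, x) =>
      match freeB maps y x with
      | none => none
      | some false => loopB rec maps cells rest
      | some true =>
        match rec (placeA maps y x) (i + 1) with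
        | some true => some true
        | some false => loopB rec maps cells rest
        | none => none

-- dfs(k, start); fuel = k + 1, a totality guard only
def dfsB : Nat → List (List Int) → List (Int × Int) → Int → Int → Int → Option Bool
  | 0, _, _, _, _, _ => some false
  | fuel + 1, maps, cells, k, w, start =>
    if k = 0 then straightB maps (PySem.List.pyRange 1 (w - 2) 1)
    else
      loopB (fun m s => dfsB fuel m cells (k - 1) w s) maps cells
        (PySem.List.pyRange start (cells.length : Int) 1)

def add_ladder_alt (maps : List (List Int)) (cnt : Int) (limit : Int) : Option Bool :=
  let need := limit - cnt
  if need < 0 then none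
  else
    match PySem.List.pyGet? maps 0 with
    | none => none
    | some r0 =>
      let w : Int := (r0.length : Int)
      let cells := cellsB (maps.length : Int) w
      match dfsB (need.toNat + 1) maps cells need w 0 with
      | some true => some true
      | _ => none

-- ===== PRECONDITION & SPEC =====
-- Pre_ admits every nonempty board of width w ≤ 3 (both programs do no work there), and for
-- wider boards the well-formed instances of this problem: rectangular, 1-cells (ladder rungs)
-- only in columns 1..w-3 with no two horizontally adjacent, and cnt ≤ limit.  Outside it A can
-- raise (IndexError on empty/ragged boards or stray ones driving the column walk off a row;
-- RecursionError when cnt > limit on large boards) or return values produced by Python's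
-- negative-index wraparound inside check; see claim.json "cites" for excluded inputs on which
-- A still returns.
def Pre_add_ladder (maps : List (List Int)) (cnt : Int) (limit : Int) : Prop :=
  maps ≠ [] ∧
  ((maps.headD []).length ≤ 3 ∨
    (cnt ≤ limit ∧
      ∀ row ∈ maps, row.length = (maps.headD []).length ∧
        ∀ j ∈ List.range row.length,
          (row.getD j 0 = 1 → 1 ≤ j ∧ j + 3 ≤ row.length) ∧
          ¬(row.getD j 0 = 1 ∧ row.getD (j + 1) 0 = 1)))
instance (maps : List (List Int)) (cnt : Int) (limit : Int) : Decidable (Pre_add_ladder maps cnt limit) := by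
  unfold Pre_add_ladder; infer_instance

def pvWitness_add_ladder : List (List Int) × Int × Int := ([[0, 1, 0, 0, 0], [0, 0, 1, 0, 0]], 0, 1)

def Spec_add_ladder (maps : List (List Int)) (cnt : Int) (limit : Int) (out : Option Bool) : Prop := out = add_ladder_alt maps cnt limit
instance (maps : List (List Int)) (cnt : Int) (limit : Int) (out : Option Bool) : Decidable (Spec_add_ladder maps cnt limit out) := by
  unfold Spec_add_ladder; infer_instance

-- ===== CLAIM (what is proved, stated in full; the proofs are below) =====
def Claim_equal_add_ladder : Prop := ∀ (maps : List (List Int)) (cnt : Int) (limit : Int), Dom_add_ladder maps cnt limit → Pre_add_ladder maps cnt limit → Spec_add_ladder maps cnt limit (add_ladder maps cnt limit)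

-- ===== LEMMAS AND PROOFS =====

-- ---- model: board values, freeness, placement sequences ----
def bval (b : List (List Int)) (y x : Int) : Int := (b.getD y.toNat []).getD x.toNat 0

def FreeM (b : List (List Int)) (y x : Int) : Prop :=
  bval b y x ≠ 1 ∧ bval b y (x - 1) ≠ 1 ∧ bval b y (x + 1) ≠ 1

def Rect (w : Nat) (b : List (List Int)) : Prop := ∀ row ∈ b, row.length = w

def InG (w : Nat) (b : List (List Int)) (c : Int × Int) : Prop :=
  0 ≤ c.1 ∧ c.1 < (b.length : Int) ∧ 1 ≤ c.2 ∧ c.2 < (w : Int) - 2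

def StepsL (w : Nat) : List (List Int) → List (Int × Int) → Prop
  | b, [] => checkA b = some true
  | b, c :: S => InG w b c ∧ FreeM b c.1 c.2 ∧ StepsL w (placeA b c.1 c.2) S

def PkA (w : Nat) : Nat → List (List Int) → Prop
  | 0, b => checkA b = some true
  | k + 1, b => ∃ c : Int × Int, InG w b c ∧ FreeM b c.1 c.2 ∧ PkA w k (placeA b c.1 c.2)

def QB (w : Nat) (cells : List (Int × Int)) : Nat → List (List Int) → Int → Prop
  | 0, b, _ => checkA b = some true
  | k + 1, b, s =>
    ∃ i : Int, s ≤ i ∧ i < (cells.length : Int) ∧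
      FreeM b (PySem.List.pyGetD cells i (0, 0)).1 (PySem.List.pyGetD cells i (0, 0)).2 ∧
      QB w cells k (placeA b (PySem.List.pyGetD cells i (0, 0)).1 (PySem.List.pyGetD cells i (0, 0)).2) (i + 1)

-- ---- basic board lemmas ----
theorem length_placeA (b : List (List Int)) (y x : Int) : (placeA b y x).length = b.length := by
  simp [placeA, PySem.List.length_pySetD]

theorem rect_placeA {w : Nat} {b : List (List Int)} (hR : Rect w b) {y : Int} (x : Int)
    (hy : 0 ≤ y) : Rect w (placeA b y x) := by
  intro row hrow
  rw [placeA, PySem.List.pySetD_of_nonneg _ _ hy] at hrow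
  rcases List.mem_or_eq_of_mem_set hrow with h | h
  · exact hR _ h
  · subst h
    by_cases hyl : y.toNat < b.length
    · rw [PySem.List.length_pySetD, PySem.List.pyGetD_eq_getElem _ _ hy (by omega)]
      exact hR _ (List.getElem_mem hyl)
    · -- row index out of range: List.set is the identity there, so this row is in b anyway
      rw [List.set_eq_of_length_le (by omega)] at hrow
      exact hR _ hrow

theorem ne_nil_placeA {b : List (List Int)} (h : b ≠ []) (y x : Int) : placeA b y x ≠ [] := by
  have := length_placeA b y x
  intro hc; rw [hc] at this; simp at this
  exact h (List.eq_nil_of_length_eq_zero this.symm)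

theorem bval_placeA {w : Nat} {b : List (List Int)} {yc xc : Int} (hR : Rect w b)
    (hc : InG w b (yc, xc)) {y x : Int} (hy : 0 ≤ y) (hx : 0 ≤ x) :
    bval (placeA b yc xc) y x = if y = yc ∧ x = xc then 1 else bval b y x := by
  obtain ⟨h1, h2, h3, h4⟩ := hc
  simp only at h1 h2 h3 h4
  have hylen : yc.toNat < b.length := by omega
  have hrowlen : b[yc.toNat].length = w := hR _ (List.getElem_mem hylen)
  have hxc : xc.toNat < b[yc.toNat].length := by omega
  rw [placeA, PySem.List.pyGetD_eq_getElem _ _ h1 (by omega),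
    PySem.List.pySetD_of_nonneg _ _ (by omega : (0:Int) ≤ xc),
    PySem.List.pySetD_of_nonneg _ _ h1]
  unfold bval
  simp only [List.getD_eq_getElem?_getD]
  by_cases hyy : y.toNat = yc.toNat
  · rw [hyy, List.getElem?_set_self (by omega)]
    have hyeq : y = yc := by omega
    by_cases hxx : x.toNat = xc.toNat
    · have hxeq : x = xc := by omega
      simp only [Option.getD_some]
      rw [hxx, List.getElem?_set_self hxc]
      simp [hyeq, hxeq]
    · have hxne : ¬(y = yc ∧ x = xc) := by omega
      simp only [Option.getD_some]
      rw [List.getElem?_set_ne (by omega)]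
      simp [hxne, List.getElem?_eq_getElem hylen]
  · have hne : ¬(y = yc ∧ x = xc) := by omega
    rw [List.getElem?_set_ne (by omega)]
    simp [hne]

theorem placeA_eq_set {b : List (List Int)} {y x : Int} (hy : 0 ≤ y) (hx : 0 ≤ x)
    (hl : y.toNat < b.length) :
    placeA b y x = b.set y.toNat (b[y.toNat].set x.toNat 1) := by
  rw [placeA, PySem.List.pyGetD_eq_getElem _ _ hy (by omega),
    PySem.List.pySetD_of_nonneg _ _ hx, PySem.List.pySetD_of_nonneg _ _ hy]

theorem placeA_comm {w : Nat} {b : List (List Int)} {c d : Int × Int}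
    (hc : InG w b c) (hd : InG w b d) (hne : ¬(c.1 = d.1 ∧ c.2 = d.2)) :
    placeA (placeA b c.1 c.2) d.1 d.2 = placeA (placeA b d.1 d.2) c.1 c.2 := by
  obtain ⟨hc1, hc2, hc3, hc4⟩ := hc
  obtain ⟨hd1, hd2, hd3, hd4⟩ := hd
  have hcl : c.1.toNat < b.length := by omega
  have hdl : d.1.toNat < b.length := by omega
  rw [placeA_eq_set hc1 (by omega) hcl, placeA_eq_set hd1 (by omega) hdl,
    placeA_eq_set hd1 (by omega) (by simpa using hdl),
    placeA_eq_set hc1 (by omega) (by simpa using hcl)]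
  by_cases hyy : c.1.toNat = d.1.toNat
  · have he : d.1 = c.1 := by omega
    have hxx : c.2.toNat ≠ d.2.toNat := by omega
    simp only [he, List.getElem_set_self, List.set_set]
    rw [List.set_comm _ _ hxx]
  · rw [List.getElem_set_ne hyy, List.getElem_set_ne (Ne.symm hyy),
      List.set_comm _ _ hyy]

-- ---- permutation invariance of placement sequences ----
theorem inG_placeA {w : Nat} {b : List (List Int)} {c : Int × Int} (y x : Int) :
    InG w (placeA b y x) c ↔ InG w b c := by
  unfold InG; rw [length_placeA]

theorem steps_swap {w : Nat} {b : List (List Int)} {c d : Int × Int} {S : List (Int × Int)}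
    (hR : Rect w b) (h : StepsL w b (c :: d :: S)) : StepsL w b (d :: c :: S) := by
  simp only [StepsL] at h ⊢
  obtain ⟨hcG, hcF, hdG', hdF', hS⟩ := h
  have hdG : InG w b d := (inG_placeA _ _).mp hdG'
  obtain ⟨hc1, hc2, hc3, hc4⟩ := hcG
  obtain ⟨hd1, hd2, hd3, hd4⟩ := hdG
  have hcG' : InG w b c := ⟨hc1, hc2, hc3, hc4⟩
  have hdG2 : InG w b d := ⟨hd1, hd2, hd3, hd4⟩
  obtain ⟨g1, g2, g3⟩ := hdF'
  rw [bval_placeA hR hcG' hd1 (by omega : (0:Int) ≤ d.2)] at g1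
  rw [bval_placeA hR hcG' hd1 (by omega : (0:Int) ≤ d.2 - 1)] at g2
  rw [bval_placeA hR hcG' hd1 (by omega : (0:Int) ≤ d.2 + 1)] at g3
  have n1 : ¬(d.1 = c.1 ∧ d.2 = c.2) := by
    intro hh; rw [if_pos hh] at g1; exact g1 rfl
  have n2 : ¬(d.1 = c.1 ∧ d.2 - 1 = c.2) := by
    intro hh; rw [if_pos hh] at g2; exact g2 rfl
  have n3 : ¬(d.1 = c.1 ∧ d.2 + 1 = c.2) := by
    intro hh; rw [if_pos hh] at g3; exact g3 rfl
  rw [if_neg n1] at g1; rw [if_neg n2] at g2; rw [if_neg n3] at g3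
  obtain ⟨f1, f2, f3⟩ := hcF
  refine ⟨hdG2, ⟨g1, g2, g3⟩, (inG_placeA _ _).mpr hcG', ⟨?_, ?_, ?_⟩, ?_⟩
  · rw [bval_placeA hR hdG2 hc1 (by omega : (0:Int) ≤ c.2),
      if_neg (by intro hh; exact n1 ⟨hh.1.symm, hh.2.symm⟩)]
    exact f1
  · rw [bval_placeA hR hdG2 hc1 (by omega : (0:Int) ≤ c.2 - 1),
      if_neg (by intro hh; apply n3; constructor <;> omega)]
    exact f2
  · rw [bval_placeA hR hdG2 hc1 (by omega : (0:Int) ≤ c.2 + 1),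
      if_neg (by intro hh; apply n2; constructor <;> omega)]
    exact f3
  · rw [placeA_comm hdG2 hcG' (by intro hh; exact n1 hh)]
    exact hS

theorem steps_perm {w : Nat} {S T : List (Int × Int)} (hp : S.Perm T) :
    ∀ {b : List (List Int)}, Rect w b → StepsL w b S → StepsL w b T := by
  induction hp with
  | nil => intro b _ h; exact h
  | cons x _ ih =>
    intro b hR h
    simp only [StepsL] at h ⊢
    obtain ⟨hG, hF, hS⟩ := h
    exact ⟨hG, hF, ih (rect_placeA hR x.2 hG.1) hS⟩
  | swap x y _ => intro b hR h; exact steps_swap hR h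
  | trans _ _ ih₁ ih₂ => intro b hR h; exact ih₂ hR (ih₁ hR h)

theorem ones_persist {w : Nat} {cy cx : Int} (hc1 : 0 ≤ cy) (hc2 : 0 ≤ cx) :
    ∀ (S : List (Int × Int)) (b : List (List Int)), Rect w b → bval b cy cx = 1 →
      StepsL w b S → (cy, cx) ∉ S := by
  intro S
  induction S with
  | nil => intro b _ _ _; simp
  | cons d S' ih =>
    intro b hR h1 hS
    simp only [StepsL] at hS
    obtain ⟨hdG, hdF, hS'⟩ := hS
    simp only [List.mem_cons]
    rintro (hh | hh)
    · rw [← hh] at hdF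
      exact hdF.1 h1
    · refine ih (placeA b d.1 d.2) (rect_placeA hR d.2 hdG.1) ?_ hS' |>.elim (by simpa using hh)
      rw [bval_placeA hR hdG hc1 hc2]
      split_ifs with hif
      · rfl
      · exact h1

theorem steps_nodup {w : Nat} : ∀ {S : List (Int × Int)} {b : List (List Int)},
    Rect w b → StepsL w b S → S.Nodup := by
  intro S
  induction S with
  | nil => intro b _ _; simp
  | cons c S' ih =>
    intro b hR hS
    simp only [StepsL] at hS
    obtain ⟨hG, hF, hS'⟩ := hS
    have hRp := rect_placeA hR c.2 hG.1
    refine List.nodup_cons.mpr ⟨?_, ih hRp hS'⟩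
    have h1 : bval (placeA b c.1 c.2) c.1 c.2 = 1 := by
      rw [bval_placeA hR hG hG.1 (by have := hG.2.2.1; omega)]
      simp
    simpa using ones_persist hG.1 (by have := hG.2.2.1 ; omega) S' _ hRp h1 hS'

-- ---- PkA ↔ existence of a placement sequence ----
theorem pkA_iff_steps {w : Nat} : ∀ {k : Nat} {b : List (List Int)},
    PkA w k b ↔ ∃ S : List (Int × Int), S.length = k ∧ StepsL w b S := by
  intro k
  induction k with
  | zero =>
    intro b
    constructor
    · intro h; exact ⟨[], rfl, h⟩
    · rintro ⟨S, hl, hs⟩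
      rw [List.length_eq_zero_iff] at hl
      subst hl; exact hs
  | succ k ih =>
    intro b
    constructor
    · rintro ⟨c, hG, hF, hk⟩
      obtain ⟨S', hl, hs⟩ := ih.mp hk
      exact ⟨c :: S', by simp [hl], ⟨hG, hF, hs⟩⟩
    · rintro ⟨S, hl, hs⟩
      cases S with
      | nil => simp at hl
      | cons c S' =>
        obtain ⟨hG, hF, hs'⟩ := hs
        exact ⟨c, hG, hF, ih.mpr ⟨S', by simpa using hl, hs'⟩⟩

-- ---- the candidate-cell list ----
theorem mem_cellsB {h w : Int} {c : Int × Int} :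
    c ∈ cellsB h w ↔ 0 ≤ c.1 ∧ c.1 < h ∧ 1 ≤ c.2 ∧ c.2 < w - 2 := by
  obtain ⟨cy, cx⟩ := c
  simp only [cellsB, List.mem_flatMap, List.mem_map, PySem.List.mem_pyRange_one, Prod.mk.injEq]
  constructor
  · rintro ⟨y, hy, x, hx, rfl, rfl⟩
    exact ⟨hy.1, hy.2, hx.1, hx.2⟩
  · rintro ⟨h1, h2, h3, h4⟩
    exact ⟨cy, ⟨h1, h2⟩, cx, ⟨h3, h4⟩, rfl, rfl⟩

theorem nodup_cellsB (h w : Int) : (cellsB h w).Nodup := by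
  refine List.nodup_flatMap.mpr ⟨?_, ?_⟩
  · intro y _
    exact (PySem.List.nodup_pyRange_one _ _).map (by intro a b hab; exact (Prod.ext_iff.mp hab).2)
  · have hnd := PySem.List.nodup_pyRange_one 0 h
    rw [List.nodup_iff_pairwise_ne] at hnd
    refine hnd.imp ?_
    intro a b hab p hp hq
    simp only [List.mem_map] at hp hq
    obtain ⟨x1, _, rfl⟩ := hp
    obtain ⟨x2, _, he⟩ := hq
    exact hab ((Prod.ext_iff.mp he).1.symm)

-- ---- sublist extraction ----
theorem cons_sublist_index {α : Type} {c : α} {S t : List α} (h : (c :: S).Sublist t) :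
    ∃ j : Nat, j < t.length ∧ t[j]? = some c ∧ S.Sublist (t.drop (j + 1)) := by
  induction t with
  | nil => simp at h
  | cons a t ih =>
    cases h with
    | cons _ h' =>
      obtain ⟨j, hj, hget, hdrop⟩ := ih h'
      exact ⟨j + 1, by simpa using hj, by simpa using hget, by simpa using hdrop⟩
    | cons₂ _ h' =>
      exact ⟨0, by simp, by simp, by simpa using h'⟩

-- ---- QB ↔ PkA (the canonical-order argument) ----
theorem steps_sublist_qb {w : Nat} {hh : Int} :
    ∀ (S : List (Int × Int)) (b : List (List Int)) (s : Int), 0 ≤ s →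
      hh = (b.length : Int) →
      S.Sublist ((cellsB hh (w : Int)).drop s.toNat) → StepsL w b S →
      QB w (cellsB hh (w : Int)) S.length b s := by
  intro S
  induction S with
  | nil => intro b s _ _ _ hS; exact hS
  | cons c S' ih =>
    intro b s hs hl hsub hS
    obtain ⟨hG, hF, hS'⟩ := hS
    obtain ⟨j, hj, hget, hdrop⟩ := cons_sublist_index hsub
    rw [List.length_drop] at hj
    have hjc : ((cellsB hh (w : Int)).drop s.toNat)[j]? = (cellsB hh (w : Int))[s.toNat + j]? :=
      List.getElem?_drop
    set cells := cellsB hh (w : Int) with hcells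
    have hlen : s.toNat + j < cells.length := by omega
    have hgc : cells[s.toNat + j]? = some c := by rw [← hjc]; exact hget
    have hgc' : cells[s.toNat + j] = c := by
      have := List.getElem?_eq_getElem hlen
      rw [this] at hgc; exact Option.some.inj hgc
    have hpg : PySem.List.pyGetD cells (s + (j : Int)) (0, 0) = c := by
      rw [PySem.List.pyGetD_eq_getElem _ _ (by omega) (by omega)]
      have h2 : (s + (j : Int)).toNat = s.toNat + j := by omega
      simp only [h2]
      exact hgc'
    refine ⟨s + (j : Int), by omega, by omega, ?_, ?_⟩
    · rw [hpg]; exact hF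
    · rw [hpg]
      exact ih (placeA b c.1 c.2) (s + (j : Int) + 1) (by omega)
        (by rw [length_placeA]; exact hl)
        (by
          have h3 : (s + (j : Int) + 1).toNat = s.toNat + (j + 1) := by omega
          rw [h3, ← List.drop_drop]
          exact hdrop)
        hS'

theorem steps_mem_cells {w : Nat} {hh : Int} : ∀ (S : List (Int × Int)) (b : List (List Int)),
    hh = (b.length : Int) → StepsL w b S → ∀ c ∈ S, c ∈ cellsB hh (w : Int) := by
  intro S
  induction S with
  | nil => intro b _ _ c hc; simp at hc
  | cons d S' ih =>
    intro b hl hS c hc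
    obtain ⟨hG, hF, hS'⟩ := hS
    rcases List.mem_cons.mp hc with rfl | hc'
    · rw [mem_cellsB, hl]
      exact hG
    · exact ih (placeA b d.1 d.2) (by rw [length_placeA]; exact hl) hS' c hc'

theorem qb_to_pkA {w : Nat} {hh : Int} : ∀ {k : Nat} {b : List (List Int)} {s : Int},
    0 ≤ s → hh = (b.length : Int) → QB w (cellsB hh (w : Int)) k b s → PkA w k b := by
  intro k
  induction k with
  | zero => intro b s _ _ h; exact h
  | succ k ih =>
    intro b s hs hl h
    obtain ⟨i, hi1, hi2, hF, hQ⟩ := h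
    set c := PySem.List.pyGetD (cellsB hh (w : Int)) i (0, 0) with hc
    have hmem : c ∈ cellsB hh (w : Int) := by
      rw [hc, PySem.List.pyGetD_eq_getElem _ _ (by omega) hi2]
      exact List.getElem_mem (by omega)
    have hG : InG w b c := by
      have := mem_cellsB.mp hmem
      rw [hl] at this
      exact this
    exact ⟨c, hG, hF, ih (by omega) (by rw [length_placeA]; exact hl) hQ⟩

theorem pkA_to_qb {w : Nat} {hh : Int} {k : Nat} {b : List (List Int)}
    (hl : hh = (b.length : Int)) (hR : Rect w b) (h : PkA w k b) :
    QB w (cellsB hh (w : Int)) k b 0 := by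
  obtain ⟨S, hlen, hS⟩ := pkA_iff_steps.mp h
  have hmem : ∀ c ∈ S, c ∈ cellsB hh (w : Int) := steps_mem_cells S b hl hS
  have hndS : S.Nodup := steps_nodup hR hS
  set T := (cellsB hh (w : Int)).filter (fun c => decide (c ∈ S)) with hT
  have hndT : T.Nodup := (nodup_cellsB _ _).filter _
  have hperm : S.Perm T := by
    refine List.perm_of_nodup_nodup_toFinset_eq hndS hndT ?_
    ext c
    simp only [List.mem_toFinset, hT, List.mem_filter, decide_eq_true_eq]
    exact ⟨fun hc => ⟨hmem c hc, hc⟩, fun hc => hc.2⟩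
  have hsubl : T.Sublist (cellsB hh (w : Int)) := List.filter_sublist
  have hq := steps_sublist_qb T b 0 le_rfl hl (by simpa using hsubl) (steps_perm hperm hR hS)
  rw [← hperm.length_eq, hlen] at hq
  exact hq

-- ---- characterizing port A ----
theorem bval_eq_getElem {b : List (List Int)} {y x : Int} (hyt : y.toNat < b.length)
    (hxt : x.toNat < b[y.toNat].length) : bval b y x = b[y.toNat][x.toNat] := by
  unfold bval
  rw [List.getD_eq_getElem _ _ hyt, List.getD_eq_getElem _ _ hxt]

theorem condFreeA_eq {w : Nat} {b : List (List Int)} (hR : Rect w b) {y x : Int}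
    (hy : 0 ≤ y) (hyl : y < (b.length : Int)) (hx : 1 ≤ x) (hxw : x < (w : Int) - 2) :
    condFreeA b y x =
      some (decide (bval b y x ≠ 1 ∧ bval b y (x - 1) ≠ 1 ∧ bval b y (x + 1) ≠ 1)) := by
  have hyt : y.toNat < b.length := by omega
  have hrow : PySem.List.pyGet? b y = some b[y.toNat] :=
    PySem.List.pyGet?_eq_some_getElem _ hy hyl
  have hrl : b[y.toNat].length = w := hR _ (List.getElem_mem hyt)
  have hwx : x.toNat < b[y.toNat].length := by omega
  have hwx1 : (x - 1).toNat < b[y.toNat].length := by omega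
  have hwx2 : (x + 1).toNat < b[y.toNat].length := by omega
  have hb1 : PySem.List.pyGet? b[y.toNat] x = some (bval b y x) := by
    rw [PySem.List.pyGet?_eq_some_getElem _ (by omega) (by omega), bval_eq_getElem hyt hwx]
  have hb2 : PySem.List.pyGet? b[y.toNat] (x - 1) = some (bval b y (x - 1)) := by
    rw [PySem.List.pyGet?_eq_some_getElem _ (by omega) (by omega), bval_eq_getElem hyt hwx1]
  have hb3 : PySem.List.pyGet? b[y.toNat] (x + 1) = some (bval b y (x + 1)) := by
    rw [PySem.List.pyGet?_eq_some_getElem _ (by omega) (by omega), bval_eq_getElem hyt hwx2]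
  simp only [condFreeA, hrow, hb1, hb2, hb3]
  by_cases v1 : bval b y x = 1 <;> by_cases v2 : bval b y (x - 1) = 1 <;>
    by_cases v3 : bval b y (x + 1) = 1 <;> simp [v1, v2, v3]

theorem loopXA_iff {rec : List (List Int) → Option Bool} {b : List (List Int)} {y : Int}
    {xs : List Int} (hcf : ∀ x ∈ xs, condFreeA b y x ≠ none) :
    (loopXA rec b y xs = some true ↔
      ∃ x ∈ xs, condFreeA b y x = some true ∧ rec (placeA b y x) = some true) := by
  induction xs with
  | nil => simp [loopXA]
  | cons x rest ih =>
    have ih' := ih (fun z hz => hcf z (List.mem_cons_of_mem _ hz))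
    rcases hv : condFreeA b y x with _ | bv
    · exact absurd hv (hcf x List.mem_cons_self)
    · cases bv with
      | false => simp [loopXA, hv, ih']
      | true =>
        rcases hr : rec (placeA b y x) with _ | rb
        · simp [loopXA, hv, hr, ih']
        · cases rb with
          | false => simp [loopXA, hv, hr, ih']
          | true => simp [loopXA, hv, hr]

theorem loopYA_iff {rec : List (List Int) → Option Bool} {b : List (List Int)}
    {xs : List Int} {ys : List Int} :
    (loopYA rec b xs ys = some true ↔ ∃ y ∈ ys, loopXA rec b y xs = some true) := by
  induction ys with
  | nil => simp [loopYA]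
  | cons y rest ih =>
    rcases hxa : loopXA rec b y xs with _ | xb
    · simp [loopYA, hxa, ih]
    · cases xb with
      | false => simp [loopYA, hxa, ih]
      | true => simp [loopYA, hxa]

theorem head_len {w : Nat} (m : List (List Int)) (hm : m ≠ []) (hRm : Rect w m) :
    (m.headD []).length = w := by
  cases m with
  | nil => exact absurd rfl hm
  | cons a l => exact hRm a (by simp)

theorem goA_iff {w : Nat} : ∀ (k : Nat) (b : List (List Int)) (cnt limit : Int),
    Rect w b → b ≠ [] → (b.headD []).length = w → cnt ≤ limit → (limit - cnt).toNat = k →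
    (goA (k + 1) b cnt limit = some true ↔ PkA w k b) := by
  intro k
  induction k with
  | zero =>
    intro b cnt limit hR hbne hw hcl hk
    have hcnt : cnt = limit := by omega
    simp only [goA, if_pos hcnt, PkA]
    rcases hc : checkA b with _ | cb
    · simp
    · cases cb <;> simp
  | succ k ih =>
    intro b cnt limit hR hbne hw hcl hk
    have hcnt : cnt ≠ limit := by omega
    obtain ⟨r, t, rfl⟩ : ∃ r t, b = r :: t := by
      cases b with
      | nil => exact absurd rfl hbne
      | cons r t => exact ⟨r, t, rfl⟩
    simp only [List.headD_cons] at hw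
    have hiff : ∀ y x : Int, 0 ≤ y → y < ((r :: t).length : Int) → 1 ≤ x → x < (w : Int) - 2 →
        ((condFreeA (r :: t) y x = some true ↔ FreeM (r :: t) y x) ∧
          condFreeA (r :: t) y x ≠ none) := by
      intro y x h1 h2 h3 h4
      rw [condFreeA_eq hR h1 h2 h3 h4]
      constructor
      · simp [FreeM]
      · simp
    have hcf : ∀ y : Int, 0 ≤ y → y < ((r :: t).length : Int) →
        ∀ x ∈ PySem.List.pyRange 1 ((r.length : Int) - 2) 1, condFreeA (r :: t) y x ≠ none := by
      intro y h1 h2 x hx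
      rw [PySem.List.mem_pyRange_one] at hx
      exact (hiff y x h1 h2 hx.1 (by omega)).2
    simp only [goA, if_neg hcnt, PySem.List.pyGet?_zero_cons]
    rw [loopYA_iff]
    constructor
    · rintro ⟨y, hy, hxa⟩
      rw [PySem.List.mem_pyRange_one] at hy
      rw [loopXA_iff (hcf y hy.1 hy.2)] at hxa
      obtain ⟨x, hx, hcv, hrec⟩ := hxa
      rw [PySem.List.mem_pyRange_one] at hx
      simp only [PkA]
      refine ⟨(y, x), ⟨hy.1, hy.2, hx.1, by omega⟩,
        (hiff y x hy.1 hy.2 hx.1 (by omega)).1.mp hcv, ?_⟩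
      have hRp := rect_placeA hR (y := y) x hy.1
      exact (ih (placeA (r :: t) y x) (cnt + 1) limit hRp
        (ne_nil_placeA (by simp) y x)
        (head_len _ (ne_nil_placeA (by simp) y x) hRp) (by omega) (by omega)).mp hrec
    · intro hPk
      simp only [PkA] at hPk
      obtain ⟨c, hG, hF, hp⟩ := hPk
      obtain ⟨h1, h2, h3, h4⟩ := hG
      refine ⟨c.1, PySem.List.mem_pyRange_one.mpr ⟨h1, h2⟩, ?_⟩
      rw [loopXA_iff (hcf c.1 h1 h2)]
      refine ⟨c.2, PySem.List.mem_pyRange_one.mpr ⟨h3, by omega⟩,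
        (hiff c.1 c.2 h1 h2 h3 h4).1.mpr hF, ?_⟩
      have hRp := rect_placeA hR (y := c.1) c.2 h1
      exact (ih (placeA (r :: t) c.1 c.2) (cnt + 1) limit hRp
        (ne_nil_placeA (by simp) c.1 c.2)
        (head_len _ (ne_nil_placeA (by simp) c.1 c.2) hRp) (by omega) (by omega)).mpr hp

-- ---- validity of the board is preserved, so check never hits an IndexError ----
def RowOnes (w : Nat) (row : List Int) : Prop :=
  ∀ j : Nat, (row.getD j 0 = 1 → 1 ≤ j ∧ j + 3 ≤ w) ∧
    ¬(row.getD j 0 = 1 ∧ row.getD (j + 1) 0 = 1)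

def ValidOnes (w : Nat) (b : List (List Int)) : Prop := ∀ row ∈ b, RowOnes w row

theorem checkStepA_some {w : Nat} {row : List Int} (hlen : row.length = w)
    (hro : RowOnes w row) {col : Int} (h1 : 1 ≤ col) (h2 : col ≤ (w : Int) - 2) :
    ∃ col', checkStepA row col = some col' ∧ 1 ≤ col' ∧ col' ≤ (w : Int) - 2 := by
  have hcl : col.toNat < row.length := by omega
  have hcl1 : (col - 1).toNat < row.length := by omega
  have hv : PySem.List.pyGet? row col = some (row[col.toNat]?.getD 0) := by
    rw [PySem.List.pyGet?_eq_some_getElem _ (by omega) (by omega),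
      ← List.getD_eq_getElem?_getD, List.getD_eq_getElem _ _ hcl]
  have hu : PySem.List.pyGet? row (col - 1) = some (row[(col - 1).toNat]?.getD 0) := by
    rw [PySem.List.pyGet?_eq_some_getElem _ (by omega) (by omega),
      ← List.getD_eq_getElem?_getD, List.getD_eq_getElem _ _ hcl1]
  simp only [checkStepA, hv, hu]
  by_cases hv1 : row[col.toNat]?.getD 0 = 1
  · refine ⟨col + 1, by rw [if_pos hv1], by omega, ?_⟩
    have := (hro col.toNat).1 (by rw [List.getD_eq_getElem?_getD]; exact hv1)
    omega
  · by_cases hu1 : row[(col - 1).toNat]?.getD 0 = 1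
    · refine ⟨col - 1, by rw [if_neg hv1, if_pos hu1], ?_, by omega⟩
      have := (hro (col - 1).toNat).1 (by rw [List.getD_eq_getElem?_getD]; exact hu1)
      omega
    · exact ⟨col, by rw [if_neg hv1, if_neg hu1], h1, h2⟩

theorem checkWalkA_some {w : Nat} : ∀ (b : List (List Int)), Rect w b → ValidOnes w b →
    ∀ {col : Int}, 1 ≤ col → col ≤ (w : Int) - 2 →
    ∃ e, checkWalkA b col = some e := by
  intro b
  induction b with
  | nil => intro _ _ col h1 h2; exact ⟨col, rfl⟩
  | cons row t ih =>
    intro hR hV col h1 h2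
    obtain ⟨c', hc', hc1, hc2⟩ :=
      checkStepA_some (hR row (by simp)) (hV row (by simp)) h1 h2
    obtain ⟨e, he⟩ := ih (fun r hr => hR r (by simp [hr])) (fun r hr => hV r (by simp [hr])) hc1 hc2
    refine ⟨e, ?_⟩
    simp only [checkWalkA, List.foldl_cons, Option.bind_some] at he ⊢
    rw [hc']
    simpa [checkWalkA] using he

theorem checkColsA_ne_none {w : Nat} {b : List (List Int)} (hR : Rect w b)
    (hV : ValidOnes w b) : ∀ (cs : List Int), (∀ c ∈ cs, 1 ≤ c ∧ c ≤ (w : Int) - 2) →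
    checkColsA b cs ≠ none := by
  intro cs
  induction cs with
  | nil => intro _; simp [checkColsA]
  | cons c rest ih =>
    intro hcs
    obtain ⟨e, he⟩ := checkWalkA_some b hR hV (hcs c (by simp)).1 (hcs c (by simp)).2
    simp only [checkColsA, he]
    by_cases hec : e ≠ c
    · simp [hec]
    · simpa [hec] using ih (fun z hz => hcs z (by simp [hz]))

theorem rowOnes_set {w : Nat} {row : List Int} (hlen : row.length = w) (hro : RowOnes w row)
    {xc : Int} (h1 : 1 ≤ xc) (h2 : xc < (w : Int) - 2)
    (hfl : row.getD (xc - 1).toNat 0 ≠ 1) (hfr : row.getD (xc + 1).toNat 0 ≠ 1) :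
    RowOnes w (row.set xc.toNat 1) := by
  have hxl : xc.toNat < row.length := by omega
  have hget : ∀ j : Nat, (row.set xc.toNat 1).getD j 0 =
      if xc.toNat = j then 1 else row.getD j 0 := by
    intro j
    rw [List.getD_eq_getElem?_getD, List.getElem?_set, List.getD_eq_getElem?_getD]
    split_ifs with hij
    · simp
    · rfl
  intro j
  rw [hget j, hget (j + 1)]
  constructor
  · intro hj
    split_ifs at hj with he
    · omega
    · exact (hro j).1 hj
  · rintro ⟨ha, hb⟩
    split_ifs at ha hb with he1 he2 he2
    · omega
    · -- j = xc, so row[xc + 1] = 1, contradicting the right neighbour being free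
      apply hfr
      have : (xc + 1).toNat = j + 1 := by omega
      rw [this]; exact hb
    · -- j + 1 = xc, so row[xc - 1] = 1, contradicting the left neighbour being free
      apply hfl
      have : (xc - 1).toNat = j := by omega
      rw [this]; exact ha
    · exact (hro j).2 ⟨ha, hb⟩

theorem validOnes_placeA {w : Nat} {b : List (List Int)} {c : Int × Int} (hR : Rect w b)
    (hV : ValidOnes w b) (hG : InG w b c) (hF : FreeM b c.1 c.2) :
    ValidOnes w (placeA b c.1 c.2) := by
  obtain ⟨h1, h2, h3, h4⟩ := hG
  have hyl : c.1.toNat < b.length := by omega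
  rw [placeA_eq_set h1 (by omega) hyl]
  intro row hrow
  rcases List.mem_or_eq_of_mem_set hrow with hr | hr
  · exact hV _ hr
  · subst hr
    have hbrow : b.getD c.1.toNat [] = b[c.1.toNat] := List.getD_eq_getElem _ _ hyl
    obtain ⟨f1, f2, f3⟩ := hF
    unfold bval at f2 f3
    rw [hbrow] at f2 f3
    exact rowOnes_set (hR _ (List.getElem_mem hyl)) (hV _ (List.getElem_mem hyl)) h3 h4 f2 f3

-- ---- characterizing port B ----
theorem stepB_eq (c : Int) (r : List Int) : stepB c r = checkStepA r c := by
  cases h1 : PySem.List.pyGet? r c with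
  | none => simp [stepB, checkStepA, h1]
  | some v =>
    cases h2 : PySem.List.pyGet? r (c - 1) with
    | none => simp [stepB, checkStepA, h1, h2]
    | some u => simp [stepB, checkStepA, h1, h2]

theorem straightB_eq (b : List (List Int)) (cs : List Int) :
    straightB b cs = checkColsA b cs := by
  have hfun : endsAtB b = checkWalkA b := by
    funext c
    simp only [endsAtB, checkWalkA]
    congr 1
    funext acc row
    cases acc <;> simp [stepB_eq]
  induction cs with
  | nil => simp [straightB, checkColsA]
  | cons c rest ih =>
    simp only [straightB, checkColsA, hfun]
    cases h : checkWalkA b c with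
    | none => simp
    | some e =>
      by_cases he : e = c
      · simp [he, ih]
      · simp [he]

theorem freeB_eq (b : List (List Int)) (y x : Int) : freeB b y x = condFreeA b y x := by
  cases h0 : PySem.List.pyGet? b y with
  | none => simp [freeB, condFreeA, h0]
  | some row =>
    cases h1 : PySem.List.pyGet? row x with
    | none => simp [freeB, condFreeA, h0, h1]
    | some v =>
      cases h2 : PySem.List.pyGet? row (x - 1) with
      | none => simp [freeB, condFreeA, h0, h1, h2]
      | some u =>
        cases h3 : PySem.List.pyGet? row (x + 1) with
        | none => simp [freeB, condFreeA, h0, h1, h2, h3]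
        | some tt => simp [freeB, condFreeA, h0, h1, h2, h3]

theorem cellsB_get_mem {w : Nat} {hh : Int} {i : Int}
    (h0 : 0 ≤ i) (h1 : i < ((cellsB hh (w : Int)).length : Int)) :
    PySem.List.pyGetD (cellsB hh (w : Int)) i (0, 0) ∈ cellsB hh (w : Int) := by
  rw [PySem.List.pyGetD_eq_getElem _ _ h0 h1]
  exact List.getElem_mem (by omega)

theorem cellsB_pyGet? {w : Nat} {hh : Int} {i : Int}
    (h0 : 0 ≤ i) (h1 : i < ((cellsB hh (w : Int)).length : Int)) :
    PySem.List.pyGet? (cellsB hh (w : Int)) i =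
      some (PySem.List.pyGetD (cellsB hh (w : Int)) i (0, 0)) := by
  rw [PySem.List.pyGet?_eq_some_getElem _ h0 h1, PySem.List.pyGetD_eq_getElem _ _ h0 h1]

theorem freeB_some {w : Nat} {b : List (List Int)} {hh : Int} (hR : Rect w b)
    (hl : hh = (b.length : Int)) {c : Int × Int} (hc : c ∈ cellsB hh (w : Int)) :
    freeB b c.1 c.2 =
      some (decide (bval b c.1 c.2 ≠ 1 ∧ bval b c.1 (c.2 - 1) ≠ 1 ∧ bval b c.1 (c.2 + 1) ≠ 1)) := by
  have hb := mem_cellsB.mp hc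
  rw [freeB_eq]
  exact condFreeA_eq hR hb.1 (by omega) hb.2.2.1 hb.2.2.2

theorem loopB_iff {w : Nat} {rec : List (List Int) → Int → Option Bool} {b : List (List Int)}
    {hh : Int} (hR : Rect w b) (hl : hh = (b.length : Int)) {is : List Int}
    (hidx : ∀ i ∈ is, 0 ≤ i ∧ i < ((cellsB hh (w : Int)).length : Int))
    (hrec : ∀ i ∈ is,
      freeB b (PySem.List.pyGetD (cellsB hh (w : Int)) i (0, 0)).1
          (PySem.List.pyGetD (cellsB hh (w : Int)) i (0, 0)).2 = some true →
      rec (placeA b (PySem.List.pyGetD (cellsB hh (w : Int)) i (0, 0)).1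
          (PySem.List.pyGetD (cellsB hh (w : Int)) i (0, 0)).2) (i + 1) ≠ none) :
    (loopB rec b (cellsB hh (w : Int)) is = some true ↔
      ∃ i ∈ is, FreeM b (PySem.List.pyGetD (cellsB hh (w : Int)) i (0, 0)).1
          (PySem.List.pyGetD (cellsB hh (w : Int)) i (0, 0)).2 ∧
        rec (placeA b (PySem.List.pyGetD (cellsB hh (w : Int)) i (0, 0)).1
          (PySem.List.pyGetD (cellsB hh (w : Int)) i (0, 0)).2) (i + 1) = some true) := by
  induction is with
  | nil => simp [loopB]
  | cons i rest ih =>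
    have ih' := ih (fun z hz => hidx z (List.mem_cons_of_mem _ hz))
      (fun z hz => hrec z (List.mem_cons_of_mem _ hz))
    obtain ⟨h0, h1⟩ := hidx i List.mem_cons_self
    have hget := cellsB_pyGet? (w := w) (hh := hh) h0 h1
    have hmem := cellsB_get_mem (w := w) (hh := hh) h0 h1
    have hfb := freeB_some hR hl hmem
    rcases hc : PySem.List.pyGetD (cellsB hh (w : Int)) i (0, 0) with ⟨cy, cx⟩
    rw [hc] at hget hfb
    by_cases hfm : bval b cy cx ≠ 1 ∧ bval b cy (cx - 1) ≠ 1 ∧ bval b cy (cx + 1) ≠ 1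
    · rw [(by simp [hfm] : (decide (bval b cy cx ≠ 1 ∧ bval b cy (cx - 1) ≠ 1 ∧
        bval b cy (cx + 1) ≠ 1)) = true)] at hfb
      rcases hr : rec (placeA b cy cx) (i + 1) with _ | rb
      · exact absurd hr (by have := hrec i List.mem_cons_self; rw [hc] at this; exact this hfb)
      · cases rb with
        | true =>
          simp only [loopB, hget, hfb, hr]
          constructor
          · intro _
            exact ⟨i, List.mem_cons_self, by rw [hc]; exact ⟨hfm, hr⟩⟩
          · intro _; trivial
        | false =>
          simp only [loopB, hget, hfb, hr]
          rw [ih']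
          constructor
          · rintro ⟨z, hz, hp⟩; exact ⟨z, List.mem_cons_of_mem _ hz, hp⟩
          · rintro ⟨z, hz, hp⟩
            rcases List.mem_cons.mp hz with hzi | hz'
            · subst hzi
              rw [hc] at hp
              have hfalse : rec (placeA b cy cx) (z + 1) = some false := hr
              rw [hfalse] at hp
              simpa using hp.2
            · exact ⟨z, hz', hp⟩
    · rw [(by simp [hfm] : (decide (bval b cy cx ≠ 1 ∧ bval b cy (cx - 1) ≠ 1 ∧
        bval b cy (cx + 1) ≠ 1)) = false)] at hfb
      simp only [loopB, hget, hfb]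
      rw [ih']
      constructor
      · rintro ⟨z, hz, hp⟩; exact ⟨z, List.mem_cons_of_mem _ hz, hp⟩
      · rintro ⟨z, hz, hp⟩
        rcases List.mem_cons.mp hz with hzi | hz'
        · subst hzi
          rw [hc] at hp; exact absurd hp.1 hfm
        · exact ⟨z, hz', hp⟩

theorem loopB_ne_none {w : Nat} {rec : List (List Int) → Int → Option Bool}
    {b : List (List Int)} {hh : Int} (hR : Rect w b) (hl : hh = (b.length : Int))
    {is : List Int}
    (hidx : ∀ i ∈ is, 0 ≤ i ∧ i < ((cellsB hh (w : Int)).length : Int))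
    (hrec : ∀ i ∈ is,
      freeB b (PySem.List.pyGetD (cellsB hh (w : Int)) i (0, 0)).1
          (PySem.List.pyGetD (cellsB hh (w : Int)) i (0, 0)).2 = some true →
      rec (placeA b (PySem.List.pyGetD (cellsB hh (w : Int)) i (0, 0)).1
          (PySem.List.pyGetD (cellsB hh (w : Int)) i (0, 0)).2) (i + 1) ≠ none) :
    loopB rec b (cellsB hh (w : Int)) is ≠ none := by
  induction is with
  | nil => simp [loopB]
  | cons i rest ih =>
    have ih' := ih (fun z hz => hidx z (List.mem_cons_of_mem _ hz))
      (fun z hz => hrec z (List.mem_cons_of_mem _ hz))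
    obtain ⟨h0, h1⟩ := hidx i List.mem_cons_self
    have hget := cellsB_pyGet? (w := w) (hh := hh) h0 h1
    have hmem := cellsB_get_mem (w := w) (hh := hh) h0 h1
    have hfb := freeB_some hR hl hmem
    rcases hc : PySem.List.pyGetD (cellsB hh (w : Int)) i (0, 0) with ⟨cy, cx⟩
    rw [hc] at hget hfb
    rcases hd : decide (bval b cy cx ≠ 1 ∧ bval b cy (cx - 1) ≠ 1 ∧ bval b cy (cx + 1) ≠ 1) with _ | _
    · rw [hd] at hfb
      simpa only [loopB, hget, hfb] using ih'
    · rw [hd] at hfb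
      rcases hr : rec (placeA b cy cx) (i + 1) with _ | rb
      · exact absurd hr (by have := hrec i List.mem_cons_self; rw [hc] at this; exact this hfb)
      · cases rb with
        | true => simp [loopB, hget, hfb, hr]
        | false => simpa only [loopB, hget, hfb, hr] using ih'

theorem freeM_of_freeB_true {w : Nat} {b : List (List Int)} {hh : Int} (hR : Rect w b)
    (hl : hh = (b.length : Int)) {c : Int × Int} (hc : c ∈ cellsB hh (w : Int))
    (h : freeB b c.1 c.2 = some true) : FreeM b c.1 c.2 := by
  rw [freeB_some hR hl hc] at h
  have h2 : bval b c.1 c.2 ≠ 1 ∧ bval b c.1 (c.2 - 1) ≠ 1 ∧ bval b c.1 (c.2 + 1) ≠ 1 :=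
    of_decide_eq_true (Option.some.inj h)
  exact h2

theorem dfsB_ne_none {w : Nat} {hh : Int} : ∀ (k : Nat) (b : List (List Int)) (s : Int),
    0 ≤ s → Rect w b → ValidOnes w b → b ≠ [] → hh = (b.length : Int) →
    dfsB (k + 1) b (cellsB hh (w : Int)) (k : Int) (w : Int) s ≠ none := by
  intro k
  induction k with
  | zero =>
    intro b s hs hR hV hb hl
    simp only [dfsB, Nat.cast_zero, reduceIte]
    rw [straightB_eq]
    refine checkColsA_ne_none hR hV _ ?_
    intro c hc
    rw [PySem.List.mem_pyRange_one] at hc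
    constructor <;> omega
  | succ k ih =>
    intro b s hs hR hV hb hl
    have hknz : ((k + 1 : Nat) : Int) ≠ 0 := by push_cast; omega
    simp only [dfsB, if_neg hknz]
    have hsimp : ((k + 1 : Nat) : Int) - 1 = (k : Int) := by push_cast; omega
    rw [hsimp]
    refine loopB_ne_none hR hl ?_ ?_
    · intro z hz
      rw [PySem.List.mem_pyRange_one] at hz
      constructor <;> omega
    · intro z hz hfree
      rw [PySem.List.mem_pyRange_one] at hz
      have hmem := cellsB_get_mem (w := w) (hh := hh) (i := z) (by omega) (by omega)
      have hG := mem_cellsB.mp hmem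
      have hF := freeM_of_freeB_true hR hl hmem hfree
      set c := PySem.List.pyGetD (cellsB hh (w : Int)) z (0, 0)
      have hGb : InG w b c := by rw [hl] at hG; exact hG
      exact ih (placeA b c.1 c.2) (z + 1) (by omega) (rect_placeA hR c.2 hGb.1)
        (validOnes_placeA hR hV hGb hF) (ne_nil_placeA hb c.1 c.2)
        (by rw [length_placeA]; exact hl)

theorem dfsB_iff {w : Nat} {hh : Int} : ∀ (k : Nat) (b : List (List Int)) (s : Int),
    Rect w b → ValidOnes w b → b ≠ [] → hh = (b.length : Int) → 0 ≤ s →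
    (dfsB (k + 1) b (cellsB hh (w : Int)) (k : Int) (w : Int) s = some true ↔
      QB w (cellsB hh (w : Int)) k b s) := by
  intro k
  induction k with
  | zero =>
    intro b s hR hV hb hl hs
    simp only [dfsB, Nat.cast_zero, reduceIte, QB]
    rw [straightB_eq]
    obtain ⟨r, t, rfl⟩ : ∃ r t, b = r :: t := by
      cases b with
      | nil => exact absurd rfl hb
      | cons r t => exact ⟨r, t, rfl⟩
    have hw : r.length = w := hR r (by simp)
    simp only [checkA, PySem.List.pyGet?_zero_cons, hw]
  | succ k ih =>
    intro b s hR hV hb hl hs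
    have hknz : ((k + 1 : Nat) : Int) ≠ 0 := by push_cast; omega
    simp only [dfsB, if_neg hknz]
    have hsimp : ((k + 1 : Nat) : Int) - 1 = (k : Int) := by push_cast; omega
    rw [hsimp]
    have hidx : ∀ i ∈ PySem.List.pyRange s ((cellsB hh (w : Int)).length : Int) 1,
        0 ≤ i ∧ i < ((cellsB hh (w : Int)).length : Int) := by
      intro i hi
      rw [PySem.List.mem_pyRange_one] at hi
      constructor <;> omega
    have hrec : ∀ i ∈ PySem.List.pyRange s ((cellsB hh (w : Int)).length : Int) 1,
        freeB b (PySem.List.pyGetD (cellsB hh (w : Int)) i (0, 0)).1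
            (PySem.List.pyGetD (cellsB hh (w : Int)) i (0, 0)).2 = some true →
        dfsB (k + 1) (placeA b (PySem.List.pyGetD (cellsB hh (w : Int)) i (0, 0)).1
            (PySem.List.pyGetD (cellsB hh (w : Int)) i (0, 0)).2) (cellsB hh (w : Int))
          (k : Int) (w : Int) (i + 1) ≠ none := by
      intro i hi hfree
      obtain ⟨h0, h1⟩ := hidx i hi
      have hmem := cellsB_get_mem (w := w) (hh := hh) h0 h1
      have hG := mem_cellsB.mp hmem
      have hF := freeM_of_freeB_true hR hl hmem hfree
      set c := PySem.List.pyGetD (cellsB hh (w : Int)) i (0, 0)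
      have hGb : InG w b c := by rw [hl] at hG; exact hG
      exact dfsB_ne_none k (placeA b c.1 c.2) (i + 1) (by omega) (rect_placeA hR c.2 hGb.1)
        (validOnes_placeA hR hV hGb hF) (ne_nil_placeA hb c.1 c.2)
        (by rw [length_placeA]; exact hl)
    rw [loopB_iff hR hl hidx hrec]
    simp only [QB]
    constructor
    · rintro ⟨i, hi, hF, hr⟩
      obtain ⟨h0, h1⟩ := hidx i hi
      rw [PySem.List.mem_pyRange_one] at hi
      have hmem := cellsB_get_mem (w := w) (hh := hh) h0 h1
      have hG := mem_cellsB.mp hmem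
      set c := PySem.List.pyGetD (cellsB hh (w : Int)) i (0, 0)
      have hGb : InG w b c := by rw [hl] at hG; exact hG
      refine ⟨i, hi.1, hi.2, hF, ?_⟩
      exact (ih (placeA b c.1 c.2) (i + 1) (rect_placeA hR c.2 hGb.1)
        (validOnes_placeA hR hV hGb hF) (ne_nil_placeA hb c.1 c.2)
        (by rw [length_placeA]; exact hl) (by omega)).mp hr
    · rintro ⟨i, hi1, hi2, hF, hq⟩
      have h0 : (0 : Int) ≤ i := by omega
      have hmem := cellsB_get_mem (w := w) (hh := hh) h0 hi2
      have hG := mem_cellsB.mp hmem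
      set c := PySem.List.pyGetD (cellsB hh (w : Int)) i (0, 0)
      have hGb : InG w b c := by rw [hl] at hG; exact hG
      refine ⟨i, PySem.List.mem_pyRange_one.mpr ⟨hi1, hi2⟩, hF, ?_⟩
      exact (ih (placeA b c.1 c.2) (i + 1) (rect_placeA hR c.2 hGb.1)
        (validOnes_placeA hR hV hGb hF) (ne_nil_placeA hb c.1 c.2)
        (by rw [length_placeA]; exact hl) (by omega)).mpr hq

-- ---- top level ----
theorem loopYA_values (rec : List (List Int) → Option Bool) (b : List (List Int))
    (xs : List Int) : ∀ ys : List Int,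
    loopYA rec b xs ys = some true ∨ loopYA rec b xs ys = none := by
  intro ys
  induction ys with
  | nil => right; rfl
  | cons y rest ih =>
    rcases hxa : loopXA rec b y xs with _ | xb
    · simpa [loopYA, hxa] using ih
    · cases xb with
      | false => simpa [loopYA, hxa] using ih
      | true => left; simp [loopYA, hxa]

theorem goA_values : ∀ (fuel : Nat) (b : List (List Int)) (cnt limit : Int),
    goA fuel b cnt limit = some true ∨ goA fuel b cnt limit = none := by
  intro fuel b cnt limit
  cases fuel with
  | zero => right; rfl
  | succ f =>
    by_cases hc : cnt = limit
    · simp only [goA, if_pos hc]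
      rcases hch : checkA b with _ | cb
      · right; rfl
      · cases cb <;> simp
    · simp only [goA, if_neg hc]
      rcases hg : PySem.List.pyGet? b 0 with _ | r0
      · right; rfl
      · exact loopYA_values _ _ _ _

theorem loopYA_nil_xs (rec : List (List Int) → Option Bool) (b : List (List Int)) :
    ∀ ys : List Int, loopYA rec b [] ys = none := by
  intro ys
  induction ys with
  | nil => rfl
  | cons y rest ih => simpa [loopYA, loopXA] using ih

theorem cellsB_nil {h w : Int} (hw : w - 2 ≤ 1) : cellsB h w = [] := by
  simp [cellsB, PySem.List.pyRange_one_eq_nil hw]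

theorem small_width_case (r : List Int) (t : List (List Int)) (cnt limit : Int)
    (hsmall : r.length ≤ 3) :
    add_ladder (r :: t) cnt limit = add_ladder_alt (r :: t) cnt limit := by
  have hxs : PySem.List.pyRange 1 ((r.length : Int) - 2) 1 = [] :=
    PySem.List.pyRange_one_eq_nil (by omega)
  have hcells : cellsB (((r :: t).length : Int)) ((r.length : Int)) = [] :=
    cellsB_nil (by omega)
  rw [add_ladder]
  by_cases hc : cnt = limit
  · have hk : (limit - cnt).toNat = 0 := by omega
    rw [hk]
    simp only [goA, if_pos hc, checkA, PySem.List.pyGet?_zero_cons, hxs, checkColsA]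
    simp only [add_ladder_alt, if_neg (by omega : ¬limit - cnt < 0),
      PySem.List.pyGet?_zero_cons, hcells]
    have hk2 : (limit - cnt).toNat + 1 = 1 := by omega
    rw [hk2]
    simp only [dfsB, if_pos (by omega : limit - cnt = 0), straightB, hxs]
  · have hA : goA ((limit - cnt).toNat + 1) (r :: t) cnt limit = none := by
      simp only [goA, if_neg hc, PySem.List.pyGet?_zero_cons, hxs]
      exact loopYA_nil_xs _ _ _
    rw [hA]
    by_cases hneg : limit - cnt < 0
    · simp only [add_ladder_alt, if_pos hneg]
    · have hkpos : limit - cnt ≠ 0 := by omega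
      simp only [add_ladder_alt, if_neg hneg, PySem.List.pyGet?_zero_cons, hcells]
      rcases hf : (limit - cnt).toNat + 1 with _ | f
      · omega
      · simp only [dfsB, if_neg hkpos, List.length_nil, Nat.cast_zero,
          PySem.List.pyRange_one_eq_nil (le_refl (0 : Int)), loopB]

-- ===== VERDICT (by name: the statement is the Claim_ definition above) =====
theorem add_ladder_spec : Claim_equal_add_ladder := by
  intro maps cnt limit hdom hpre
  obtain ⟨hnil, hpre2⟩ := hpre
  unfold Spec_add_ladder
  obtain ⟨r, t, rfl⟩ : ∃ r t, maps = r :: t := by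
    cases maps with
    | nil => exact absurd rfl hnil
    | cons r t => exact ⟨r, t, rfl⟩
  simp only [List.headD_cons] at hpre2
  rcases hpre2 with hsmall | ⟨hcl, hrows⟩
  · -- width ≤ 3: every loop in both programs is over an empty range
    exact small_width_case r t cnt limit hsmall
  set w : Nat := r.length with hwdef
  have hR : Rect w (r :: t) := fun row hrow => (hrows row hrow).1
  have hV : ValidOnes w (r :: t) := by
    intro row hrow j
    have hcond := (hrows row hrow).2
    have hlen := (hrows row hrow).1
    by_cases hj : j < row.length
    · have h := hcond j (List.mem_range.mpr hj)
      exact ⟨fun h1 => by have := h.1 h1; omega, h.2⟩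
    · have hget : row.getD j 0 = 0 := by
        rw [List.getD_eq_getElem?_getD, List.getElem?_eq_none (by omega)]; rfl
      constructor
      · intro h1; rw [hget] at h1; exact absurd h1 (by norm_num)
      · rintro ⟨h1, _⟩; rw [hget] at h1; exact absurd h1 (by norm_num)
  set k : Nat := (limit - cnt).toNat with hk
  have hA := goA_iff (w := w) k (r :: t) cnt limit hR hnil (by simp [hwdef]) hcl rfl
  have hB := dfsB_iff (w := w) (hh := ((r :: t).length : Int)) k (r :: t) 0 hR hV hnil rfl le_rfl
  have hQP : QB w (cellsB ((r :: t).length : Int) (w : Int)) k (r :: t) 0 ↔ PkA w k (r :: t) :=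
    ⟨qb_to_pkA le_rfl rfl, pkA_to_qb rfl hR⟩
  have hBN := dfsB_ne_none (w := w) (hh := ((r :: t).length : Int)) k (r :: t) 0 le_rfl hR hV hnil rfl
  have hneed : ¬(limit - cnt < 0) := by omega
  have hneedk : limit - cnt = (k : Int) := by omega
  rw [add_ladder]
  simp only [add_ladder_alt, if_neg hneed, PySem.List.pyGet?_zero_cons]
  rw [hneedk]
  simp only [Int.toNat_natCast]
  rcases goA_values (k + 1) (r :: t) cnt limit with hga | hga
  · rw [hga]
    have hdfs : dfsB (k + 1) (r :: t) (cellsB ((r :: t).length : Int) (w : Int)) (k : Int)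
        (w : Int) 0 = some true := hB.mpr (hQP.mpr (hA.mp hga))
    rw [hdfs]
  · rw [hga]
    rcases hdv : dfsB (k + 1) (r :: t) (cellsB ((r :: t).length : Int) (w : Int)) (k : Int)
        (w : Int) 0 with _ | db
    · exact absurd hdv hBN
    · cases db with
      | true =>
        exfalso
        have := hA.mpr (hQP.mp (hB.mp hdv))
        rw [hga] at this
        simp at this
      | false => rfl
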